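-- pv_equiv track=rewrite | github.com/Hong-Jinseo/Algorithm | source/삼성기출/2023_1_메이즈러너.py | minimum_square
-- ===== SOURCE A (Python) =====
-- def find_exit(graph):
--     n = len(graph)
--
--     for i in range(n):
--         for j in range(n):
--             if graph[i][j] == -1:
--                 return [i, j]
--
-- def minimum_square(graph, player):
--     ex, ey = find_exit(graph)
--     MAX = int(1e9)
--     candidate = []
--
--     # 가장 작은 정사각형을 만들 수 있는 플레이어 선별
--     for px, py in player:
--         # 해당 플레이어를 포함할 때 만들어지는 정사각형의 변의 길이
--         length = max(abs(ex - px), abs(ey - py)) + 1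
--
--         # 변의 길이가 같은 케이스가 이미 존재한다면 -> 추가
--         if length == MAX:
--             candidate.append([length, px, py])
--
--         # 해당 변의 길이가 최소라면 -> 초기화
--         elif length < MAX:
--             MAX = length
--             candidate = [[length, px, py]]
--
--     # 선별된 플레이어 중, 가장 좌측 상단의 좌표를 갖는 값 찾기
--     final = []
--     for length, px, py in candidate:
--         # 최소 사각형의 모서리 찾기
--         x1, y1 = min(px, ex), min(py, ey)  # 왼쪽 위
--         x2, y2 = max(px, ex), max(py, ey)  # 오른쪽 아래
--
--         # x, y좌표 각각 얼마만큼의 여유 공간이 있는지 파악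
--         more_x = length - (x2 - x1 + 1)
--         more_y = length - (y2 - y1 + 1)
--
--         # 0보다 큰 수 중, 여유공간만큼 왼쪽 상단으로 이동한 좌표
--         final.append([max(0, x1 - more_x), max(0, y1 - more_y), length])
--
--     # X 오름차순, Y 오름차순
--     final.sort()
--     return final[0]
-- ===== SOURCE B (Python) =====
-- def find_exit(graph):
--     n = len(graph)
--
--     for i in range(n):
--         for j in range(n):
--             if graph[i][j] == -1:
--                 return [i, j]
--
-- def minimum_square(graph, player):
--     # One pass: score every player by (side length, corner x, corner y) and take
--     # the lexicographic minimum directly -- no running-min candidate phase, no sort.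
--     ex, ey = find_exit(graph)
--
--     def score(p):
--         px, py = p
--         length = max(abs(ex - px), abs(ey - py)) + 1
--         x1, y1 = min(px, ex), min(py, ey)
--         x2, y2 = max(px, ex), max(py, ey)
--         cx = max(0, x1 - (length - (x2 - x1 + 1)))
--         cy = max(0, y1 - (length - (y2 - y1 + 1)))
--         return (length, cx, cy)
--
--     length, cx, cy = min(score(p) for p in player)
--     return [cx, cy, length]
-- ===== Notes on version B (the rewrite author's own statement) =====
-- stated objective: simpler
-- what changed: B replaces A's two-phase pipeline (running-min candidate selection with a 10^9 sentinel, then a second loop building corner rows and a sort) by a single pass that scores every player with the tuple (side length, corner x, corner y) and takes the lexicographic minimum with min(), no candidate list and no sort.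
import Mathlib
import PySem

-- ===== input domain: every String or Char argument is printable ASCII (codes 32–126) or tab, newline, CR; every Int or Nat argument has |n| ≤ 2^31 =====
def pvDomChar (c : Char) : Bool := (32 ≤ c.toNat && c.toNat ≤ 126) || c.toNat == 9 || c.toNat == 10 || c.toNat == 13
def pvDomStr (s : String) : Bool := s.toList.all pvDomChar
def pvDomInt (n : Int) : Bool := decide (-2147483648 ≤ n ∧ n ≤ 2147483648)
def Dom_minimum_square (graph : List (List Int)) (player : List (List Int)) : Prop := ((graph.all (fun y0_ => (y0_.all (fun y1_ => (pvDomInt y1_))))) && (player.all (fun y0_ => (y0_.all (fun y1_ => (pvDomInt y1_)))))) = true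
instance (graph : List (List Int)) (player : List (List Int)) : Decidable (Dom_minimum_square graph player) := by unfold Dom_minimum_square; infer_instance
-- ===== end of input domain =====

-- B folds A's candidate-selection phase, corner loop and sort into one pass taking the
-- lexicographic minimum of (length, corner x, corner y) tuples; same return value on Pre_.


-- ===== PORT A =====
-- find_exit: scan of the n×n index grid; getD's default is never hit on Pre_ inputs
-- (an out-of-range access is a Python IndexError, excluded by Pre_).
def findExit (graph : List (List Int)) : Option (Int × Int) :=
  (List.range graph.length).findSome? (fun i =>
    (List.range graph.length).findSome? (fun j =>
      if (graph.getD i []).getD j 0 = -1 then some ((i : Int), (j : Int)) else none))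

-- Python's local variables length/x1/y1/x2/y2/more_x/more_y are inlined into the expressions
-- they denote; loop order, branch order and the appends are A's.
def minimum_square (graph : List (List Int)) (player : List (List Int)) : List Int :=
  match findExit graph with
  | none => []  -- Python raises TypeError unpacking None; excluded by Pre_
  | some (ex, ey) =>
    match PySem.List.sorted
        (((player.foldl (fun (st : Int × List (Int × Int × Int)) p =>
            if max |ex - p.getD 0 0| |ey - p.getD 1 0| + 1 = st.1 then
              (st.1, st.2 ++ [(max |ex - p.getD 0 0| |ey - p.getD 1 0| + 1, p.getD 0 0, p.getD 1 0)])
            else if max |ex - p.getD 0 0| |ey - p.getD 1 0| + 1 < st.1 then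
              (max |ex - p.getD 0 0| |ey - p.getD 1 0| + 1,
               [(max |ex - p.getD 0 0| |ey - p.getD 1 0| + 1, p.getD 0 0, p.getD 1 0)])
            else st) (1000000000, ([] : List (Int × Int × Int)))).2).map (fun t =>
          [max 0 (min t.2.1 ex - (t.1 - (max t.2.1 ex - min t.2.1 ex + 1))),
           max 0 (min t.2.2 ey - (t.1 - (max t.2.2 ey - min t.2.2 ey + 1))), t.1]))
        (fun x => x) false with   -- final.sort(): Python's lexicographic list order = Lex (· < ·) on List Int
    | [] => []   -- final[0] of an empty list: IndexError; excluded by Pre_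
    | f :: _ => f

-- ===== PORT B =====
def scoreB (ex ey : Int) (p : List Int) : Int × Int × Int :=
  let px := p.getD 0 0
  let py := p.getD 1 0
  let length := max |ex - px| |ey - py| + 1
  (length,
   max 0 (min px ex - (length - (max px ex - min px ex + 1))),
   max 0 (min py ey - (length - (max py ey - min py ey + 1))))

-- Python's lexicographic order on int 3-tuples (ported by hand; exact for int tuples).
def tupLt (a b : Int × Int × Int) : Bool :=
  a.1 < b.1 || (a.1 == b.1 && (a.2.1 < b.2.1 || (a.2.1 == b.2.1 && a.2.2 < b.2.2)))

def minimum_square_alt (graph : List (List Int)) (player : List (List Int)) : List Int :=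
  match findExit graph with
  | none => []  -- Python raises TypeError unpacking None; excluded by Pre_
  | some (ex, ey) =>
    match player with
    | [] => []   -- min() of an empty generator: ValueError; excluded by Pre_
    | p0 :: rest =>
      -- min(score(p) for p in player): keep current value on ties, replace only when strictly smaller
      let m := rest.foldl (fun acc q =>
        if tupLt (scoreB ex ey q) acc then scoreB ex ey q else acc) (scoreB ex ey p0)
      [m.2.1, m.2.2, m.1]

-- ===== PRECONDITION & SPEC =====
-- Pre_ excludes exactly the inputs where the Python A raises: no exit reachable by the scan
-- (TypeError from unpacking None / IndexError inside the scan), a player row that is not a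
-- pair (ValueError), empty player or all players at Chebyshev distance ≥ 10^9 from the exit
-- (candidate list stays empty, final[0] raises IndexError).
def Pre_minimum_square (graph : List (List Int)) (player : List (List Int)) : Prop :=
  player ≠ [] ∧ (∀ p ∈ player, p.length = 2) ∧
  ∃ i < graph.length, ∃ j < graph.length,
    (j < (graph.getD i []).length ∧ (graph.getD i []).getD j 0 = -1 ∧
     (∀ j' < j, (graph.getD i []).getD j' 0 ≠ -1) ∧
     (∀ i' < i, graph.length ≤ (graph.getD i' []).length ∧
        ∀ j' < graph.length, (graph.getD i' []).getD j' 0 ≠ -1)) ∧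
    ∃ p ∈ player, max |(i : Int) - p.getD 0 0| |(j : Int) - p.getD 1 0| + 1 ≤ 1000000000
instance (graph : List (List Int)) (player : List (List Int)) : Decidable (Pre_minimum_square graph player) := by unfold Pre_minimum_square; infer_instance

def pvWitness_minimum_square : List (List Int) × List (List Int) := ([[-1]], [[0, 0]])

def Spec_minimum_square (graph : List (List Int)) (player : List (List Int)) (out : List Int) : Prop := out = minimum_square_alt graph player
instance (graph : List (List Int)) (player : List (List Int)) (out : List Int) : Decidable (Spec_minimum_square graph player out) := by unfold Spec_minimum_square; infer_instance

-- ===== CLAIM (what is proved, stated in full; the proofs are below) =====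
def Claim_equal_minimum_square : Prop := ∀ (graph : List (List Int)) (player : List (List Int)), Dom_minimum_square graph player → Pre_minimum_square graph player → Spec_minimum_square graph player (minimum_square graph player)
-- ===== LEMMAS AND PROOFS =====

-- proof-side abbreviations for the quantities both loops compute
def lenOf (ex ey : Int) (p : List Int) : Int := max |ex - p.getD 0 0| |ey - p.getD 1 0| + 1
def keyOf (ex ey : Int) (p : List Int) : Int × Int × Int := (lenOf ex ey p, p.getD 0 0, p.getD 1 0)
def Mm (ex ey : Int) (ps : List (List Int)) : Int := ps.foldl (fun m p => min m (lenOf ex ey p)) 1000000000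

lemma minfold_le_init (ex ey : Int) (ps : List (List Int)) (m0 : Int) :
    ps.foldl (fun m p => min m (lenOf ex ey p)) m0 ≤ m0 := by
  induction ps generalizing m0 with
  | nil => simp
  | cons a t ih => exact le_trans (ih _) (min_le_left _ _)

lemma minfold_le_mem (ex ey : Int) {ps : List (List Int)} {p : List Int} (hp : p ∈ ps) :
    ∀ m0 : Int, ps.foldl (fun m p => min m (lenOf ex ey p)) m0 ≤ lenOf ex ey p := by
  induction ps with
  | nil => cases hp
  | cons a t ih =>
    intro m0
    simp only [List.foldl_cons]
    rcases List.mem_cons.1 hp with rfl | hp'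
    · exact le_trans (minfold_le_init ex ey t _) (min_le_right _ _)
    · exact ih hp' _

lemma le_minfold (ex ey : Int) (ps : List (List Int)) (a : Int)
    (h : ∀ p ∈ ps, a ≤ lenOf ex ey p) :
    ∀ m0 : Int, a ≤ m0 → a ≤ ps.foldl (fun m p => min m (lenOf ex ey p)) m0 := by
  induction ps with
  | nil => intro m0 h0; simpa using h0
  | cons q t ih =>
    intro m0 h0
    simp only [List.foldl_cons]
    exact ih (fun p hp => h p (List.mem_cons_of_mem _ hp)) _
      (le_min h0 (h q (by simp)))

lemma foldA_inv (ex ey : Int) (ps : List (List Int)) :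
    ps.foldl (fun (st : Int × List (Int × Int × Int)) p =>
        if max |ex - p.getD 0 0| |ey - p.getD 1 0| + 1 = st.1 then
          (st.1, st.2 ++ [(max |ex - p.getD 0 0| |ey - p.getD 1 0| + 1, p.getD 0 0, p.getD 1 0)])
        else if max |ex - p.getD 0 0| |ey - p.getD 1 0| + 1 < st.1 then
          (max |ex - p.getD 0 0| |ey - p.getD 1 0| + 1,
           [(max |ex - p.getD 0 0| |ey - p.getD 1 0| + 1, p.getD 0 0, p.getD 1 0)])
        else st) (1000000000, ([] : List (Int × Int × Int))) =
    (Mm ex ey ps, (ps.map (keyOf ex ey)).filter (fun t => t.1 == Mm ex ey ps)) := by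
  induction ps using List.reverseRecOn with
  | nil => simp [Mm]
  | append_singleton t p ih =>
    have hMle : ∀ p' ∈ t, Mm ex ey t ≤ lenOf ex ey p' :=
      fun p' hp' => minfold_le_mem ex ey hp' 1000000000
    have hMm : Mm ex ey (t ++ [p]) = min (Mm ex ey t) (lenOf ex ey p) := by
      simp [Mm, List.foldl_append]
    rw [List.foldl_append, ih]
    simp only [List.foldl_cons, List.foldl_nil]
    rw [show (max |ex - p.getD 0 0| |ey - p.getD 1 0| + 1) = lenOf ex ey p from rfl]
    rw [show ((lenOf ex ey p, p.getD 0 0, p.getD 1 0) : Int × Int × Int) = keyOf ex ey p from rfl]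
    rw [hMm, List.map_append, List.filter_append]
    simp only [List.map_cons, List.map_nil, List.filter_cons, List.filter_nil]
    by_cases h1 : lenOf ex ey p = Mm ex ey t
    · rw [if_pos h1]
      have hmin : min (Mm ex ey t) (lenOf ex ey p) = Mm ex ey t := by omega
      rw [hmin]
      have hk : ((keyOf ex ey p).1 == Mm ex ey t) = true := by
        simp [keyOf, h1]
      simp [hk]
    · rw [if_neg h1]
      by_cases h2 : lenOf ex ey p < Mm ex ey t
      · rw [if_pos h2]
        have hmin : min (Mm ex ey t) (lenOf ex ey p) = lenOf ex ey p := by omega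
        rw [hmin]
        have hfilt : (t.map (keyOf ex ey)).filter (fun s => s.1 == lenOf ex ey p) = [] := by
          apply List.filter_eq_nil_iff.2
          intro s hs
          obtain ⟨p', hp', rfl⟩ := List.mem_map.1 hs
          have := hMle p' hp'
          simp only [keyOf, beq_iff_eq]
          omega
        have hk : ((keyOf ex ey p).1 == lenOf ex ey p) = true := by simp [keyOf]
        simp [hfilt, hk]
      · rw [if_neg h2]
        have hmin : min (Mm ex ey t) (lenOf ex ey p) = Mm ex ey t := by omega
        rw [hmin]
        have hk : ((keyOf ex ey p).1 == Mm ex ey t) = false := by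
          simp [keyOf]; omega
        simp [hk]

lemma t_irrefl (a : Int × Int × Int) : tupLt a a = false := by
  obtain ⟨x, y, z⟩ := a; simp [tupLt]

lemma t_trans (a b c : Int × Int × Int) (h1 : tupLt a b = true) (h2 : tupLt b c = true) :
    tupLt a c = true := by
  obtain ⟨x1, x2, x3⟩ := a; obtain ⟨y1, y2, y3⟩ := b; obtain ⟨z1, z2, z3⟩ := c
  simp [tupLt] at h1 h2 ⊢; omega

lemma t_le_lt (a q r : Int × Int × Int) (h1 : tupLt q a = false) (h2 : tupLt q r = true) :
    tupLt a r = true := by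
  obtain ⟨x1, x2, x3⟩ := a; obtain ⟨y1, y2, y3⟩ := q; obtain ⟨z1, z2, z3⟩ := r
  simp [tupLt] at h1 h2 ⊢; omega

lemma t_first (x q : Int × Int × Int) (h : tupLt x q = false) : q.1 ≤ x.1 := by
  obtain ⟨x1, x2, x3⟩ := x; obtain ⟨y1, y2, y3⟩ := q
  simp [tupLt] at h; omega

lemma foldMin_spec (l : List (Int × Int × Int)) (a : Int × Int × Int) :
    (l.foldl (fun acc s => if tupLt s acc then s else acc) a ∈ a :: l) ∧
    ∀ x ∈ a :: l, tupLt x (l.foldl (fun acc s => if tupLt s acc then s else acc) a) = false := by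
  induction l generalizing a with
  | nil => simpa using t_irrefl a
  | cons q t ih =>
    simp only [List.foldl_cons]
    by_cases hqa : tupLt q a = true
    · rw [if_pos hqa]
      obtain ⟨ihm, ihb⟩ := ih q
      refine ⟨List.mem_cons_of_mem _ ihm, ?_⟩
      intro x hx
      have hhead := ihb q (by simp)
      rcases List.mem_cons.1 hx with rfl | hx'
      · by_contra har
        have har' : tupLt x (t.foldl (fun acc s => if tupLt s acc then s else acc) q) = true := by
          simpa using har
        have := t_trans q x _ hqa har'
        rw [this] at hhead; cases hhead
      · exact ihb x hx'
    · rw [if_neg hqa]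
      obtain ⟨ihm, ihb⟩ := ih a
      have hhead := ihb a (by simp)
      refine ⟨?_, ?_⟩
      · rcases List.mem_cons.1 ihm with h | h
        · rw [h]; simp
        · exact List.mem_cons_of_mem _ (List.mem_cons_of_mem _ h)
      · intro x hx
        rcases List.mem_cons.1 hx with rfl | hx'
        · exact hhead
        rcases List.mem_cons.1 hx' with rfl | hx''
        · by_contra hqr
          have hqr' : tupLt x (t.foldl (fun acc s => if tupLt s acc then s else acc) a) = true := by
            simpa using hqr
          have := t_le_lt a x _ (by simpa using hqa) hqr'
          rw [this] at hhead; cases hhead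
        · exact ihb x (List.mem_cons_of_mem _ hx'')

lemma lex_cons_lt_iff (x y : Int) (l m : List Int) :
    List.Lex (· < ·) (x :: l) (y :: m) ↔ x < y ∨ (x = y ∧ List.Lex (· < ·) l m) := by
  constructor
  · intro h
    cases h with
    | cons h => exact Or.inr ⟨rfl, h⟩
    | rel h => exact Or.inl h
  · rintro (h | ⟨rfl, h⟩)
    · exact List.Lex.rel h
    · exact List.Lex.cons h

lemma row_lt_iff (a b c d e f : Int) :
    (([a, b, c] : List Int) < [d, e, f]) ↔ (a < d ∨ (a = d ∧ (b < e ∨ (b = e ∧ c < f)))) := by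
  show List.Lex (· < ·) _ _ ↔ _
  rw [lex_cons_lt_iff, lex_cons_lt_iff, List.lex_singleton_iff]

lemma row_le_iff (a b c d e f : Int) :
    (([a, b, c] : List Int) ≤ [d, e, f]) ↔
      (a < d ∨ (a = d ∧ (b < e ∨ (b = e ∧ (c < f ∨ c = f))))) := by
  rw [le_iff_lt_or_eq, row_lt_iff]
  have he : (([a, b, c] : List Int) = [d, e, f]) ↔ (a = d ∧ b = e ∧ c = f) := by simp
  rw [he]; omega

lemma t_row_le (x q : Int × Int × Int) (h : tupLt x q = false) (h1 : x.1 = q.1) :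
    ([q.2.1, q.2.2, q.1] : List Int) ≤ [x.2.1, x.2.2, x.1] := by
  obtain ⟨x1, x2, x3⟩ := x; obtain ⟨y1, y2, y3⟩ := q
  rw [row_le_iff]; simp [tupLt] at h h1 ⊢; omega

lemma findSome?_range_eq {β : Type} (f : Nat → Option β) (n i : Nat) (b : β)
    (hi : i < n) (h1 : ∀ k < i, f k = none) (h2 : f i = some b) :
    (List.range n).findSome? f = some b := by
  induction n with
  | zero => omega
  | succ n ihn =>
    rcases Nat.lt_succ_iff_lt_or_eq.1 hi with h | rfl
    · rw [List.range_succ, List.findSome?_append, ihn h]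
      rfl
    · rw [List.range_succ, List.findSome?_append]
      have hnone : (List.range i).findSome? f = none :=
        List.findSome?_eq_none_iff.2 (fun k hk => h1 k (List.mem_range.1 hk))
      rw [hnone]
      simp [h2]

lemma findExit_of_exitCell (graph : List (List Int)) (i j : Nat)
    (hi : i < graph.length) (hj : j < graph.length)
    (hval : (graph.getD i []).getD j 0 = -1)
    (hrow : ∀ j' < j, (graph.getD i []).getD j' 0 ≠ -1)
    (hprev : ∀ i' < i, graph.length ≤ (graph.getD i' []).length ∧
        ∀ j' < graph.length, (graph.getD i' []).getD j' 0 ≠ -1) :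
    findExit graph = some ((i : Int), (j : Int)) := by
  unfold findExit
  apply findSome?_range_eq _ _ i _ hi
  · intro k hk
    apply List.findSome?_eq_none_iff.2
    intro j' hj'
    rw [if_neg ((hprev k hk).2 j' (List.mem_range.1 hj'))]
  · apply findSome?_range_eq _ _ j _ hj
    · intro k hk
      rw [if_neg (hrow k hk)]
    · rw [if_pos hval]

-- ===== VERDICT (by name: the statement is the Claim_ definition above) =====
theorem minimum_square_spec : Claim_equal_minimum_square := by
  intro graph player _ hpre
  unfold Spec_minimum_square
  obtain ⟨hne, hlen2, i, hi, j, hj, hcell, phat, hphat, hfar⟩ := hpre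
  obtain ⟨hjlen, hval, hrow, hprev⟩ := hcell
  have hfe := findExit_of_exitCell graph i j hi hj hval hrow hprev
  obtain ⟨p0, rest, rfl⟩ : ∃ p0 rest, player = p0 :: rest := by
    cases player with
    | nil => exact absurd rfl hne
    | cons a l => exact ⟨a, l, rfl⟩
  unfold minimum_square minimum_square_alt
  rw [hfe]
  dsimp only
  set ex : Int := (i : Int) with hex
  set ey : Int := (j : Int) with hey
  rw [foldA_inv]
  dsimp only
  set q := rest.foldl (fun acc q =>
      if tupLt (scoreB ex ey q) acc then scoreB ex ey q else acc) (scoreB ex ey p0) with hqdef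
  have hq := foldMin_spec (rest.map (scoreB ex ey)) (scoreB ex ey p0)
  rw [List.foldl_map] at hq
  rw [← hqdef] at hq
  obtain ⟨hqmem, hqmin⟩ := hq
  have hqmem' : q ∈ (p0 :: rest).map (scoreB ex ey) := by simpa using hqmem
  obtain ⟨pstar, hpstar, hqeq⟩ := List.mem_map.1 hqmem'
  have hqmin' : ∀ p ∈ p0 :: rest, tupLt (scoreB ex ey p) q = false := by
    intro p hp
    rcases List.mem_cons.1 hp with rfl | hp'
    · exact hqmin _ (by simp)
    · exact hqmin _ (List.mem_cons_of_mem _ (List.mem_map_of_mem hp'))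
  set M := Mm ex ey (p0 :: rest) with hM
  have hq1_le : q.1 ≤ M := by
    apply le_minfold ex ey (p0 :: rest) q.1
      (fun p hp => t_first _ _ (hqmin' p hp))
    calc q.1 ≤ lenOf ex ey phat := t_first _ _ (hqmin' phat hphat)
      _ ≤ 1000000000 := hfar
  have hq1_ge : M ≤ q.1 := by
    calc M ≤ lenOf ex ey pstar := minfold_le_mem ex ey hpstar 1000000000
      _ = q.1 := by rw [← hqeq]; rfl
  have hq1 : q.1 = M := le_antisymm hq1_le hq1_ge
  set C := ((p0 :: rest).map (keyOf ex ey)).filter (fun t => t.1 == M) with hC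
  have hkmem : keyOf ex ey pstar ∈ C := by
    rw [hC]
    refine List.mem_filter.2 ⟨List.mem_map_of_mem hpstar, ?_⟩
    have h1 : (keyOf ex ey pstar).1 = q.1 := by rw [← hqeq]; rfl
    rw [beq_iff_eq, h1, hq1]
  have hrfinal : ([q.2.1, q.2.2, q.1] : List Int) ∈ C.map (fun t =>
      [max 0 (min t.2.1 ex - (t.1 - (max t.2.1 ex - min t.2.1 ex + 1))),
       max 0 (min t.2.2 ey - (t.1 - (max t.2.2 ey - min t.2.2 ey + 1))), t.1]) := by
    refine List.mem_map.2 ⟨keyOf ex ey pstar, hkmem, ?_⟩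
    rw [← hqeq]; rfl
  obtain ⟨f, tl, hsort⟩ : ∃ f tl, PySem.List.sorted (C.map (fun t =>
      [max 0 (min t.2.1 ex - (t.1 - (max t.2.1 ex - min t.2.1 ex + 1))),
       max 0 (min t.2.2 ey - (t.1 - (max t.2.2 ey - min t.2.2 ey + 1))), t.1]))
      (fun x => x) false = f :: tl := by
    cases h : PySem.List.sorted (C.map (fun t =>
        [max 0 (min t.2.1 ex - (t.1 - (max t.2.1 ex - min t.2.1 ex + 1))),
         max 0 (min t.2.2 ey - (t.1 - (max t.2.2 ey - min t.2.2 ey + 1))), t.1]))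
        (fun x => x) false with
    | nil =>
      rw [PySem.List.sorted_eq_nil_iff] at h
      rw [h] at hrfinal
      cases hrfinal
    | cons f tl => exact ⟨f, tl, rfl⟩
  rw [hsort]
  dsimp only
  have hfmem : f ∈ C.map (fun t =>
      [max 0 (min t.2.1 ex - (t.1 - (max t.2.1 ex - min t.2.1 ex + 1))),
       max 0 (min t.2.2 ey - (t.1 - (max t.2.2 ey - min t.2.2 ey + 1))), t.1]) := by
    have : f ∈ PySem.List.sorted (C.map (fun t =>
        [max 0 (min t.2.1 ex - (t.1 - (max t.2.1 ex - min t.2.1 ex + 1))),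
         max 0 (min t.2.2 ey - (t.1 - (max t.2.2 ey - min t.2.2 ey + 1))), t.1]))
        (fun x => x) false := by rw [hsort]; simp
    rwa [PySem.List.mem_sorted] at this
  have hfle : ∀ y ∈ C.map (fun t =>
      [max 0 (min t.2.1 ex - (t.1 - (max t.2.1 ex - min t.2.1 ex + 1))),
       max 0 (min t.2.2 ey - (t.1 - (max t.2.2 ey - min t.2.2 ey + 1))), t.1]), f ≤ y := by
    apply PySem.List.key_head_sorted_le _ (fun x => x) (t := tl)
    convert hsort using 2
  have hfler : f ≤ [q.2.1, q.2.2, q.1] := hfle _ hrfinal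
  obtain ⟨trip, htrip, hftrip⟩ := List.mem_map.1 hfmem
  obtain ⟨htm, htM⟩ := List.mem_filter.1 (hC ▸ htrip)
  obtain ⟨p', hp', hkey'⟩ := List.mem_map.1 htm
  have hts : tupLt (scoreB ex ey p') q = false := hqmin' p' hp'
  have hs1 : (scoreB ex ey p').1 = q.1 := by
    have h1 : (scoreB ex ey p').1 = trip.1 := by rw [← hkey']; rfl
    rw [h1, beq_iff_eq.1 htM, ← hq1]
  have hrlef : ([q.2.1, q.2.2, q.1] : List Int) ≤ f := by
    rw [← hftrip, ← hkey']
    exact t_row_le _ _ hts hs1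
  exact le_antisymm hfler hrlef
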